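-- pv_equiv track=rewrite | github.com/ironsheep/P2-Knowledge-Base | engineering/knowledge-base/P2/update-tracking/conflict-resolver.py | _contains_contradiction
-- ===== SOURCE A (Python) =====
-- def _contains_contradiction(value1: str, value2: str) -> bool:
--     """Check if two string values contain contradictions"""
--     v1_lower = value1.lower()
--     v2_lower = value2.lower()
--
--     # Look for contradictory boolean statements
--     bool_contradictions = [
--         (['true', 'yes', 'enable'], ['false', 'no', 'disable']),
--         (['set', 'high'], ['clear', 'low']),
--         (['required', 'must'], ['optional', 'may'])
--     ]
--
--     for positive, negative in bool_contradictions: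
--         has_pos_1 = any(word in v1_lower for word in positive)
--         has_neg_1 = any(word in v1_lower for word in negative)
--         has_pos_2 = any(word in v2_lower for word in positive)
--         has_neg_2 = any(word in v2_lower for word in negative)
--
--         if (has_pos_1 and has_neg_2) or (has_neg_1 and has_pos_2):
--             return True
--
--     return False
-- ===== SOURCE B (Python) =====
-- # One flat word->label table; scan each string position once, matching keywords
-- # that start there, instead of per-pair substring rescans.
-- _WORD_LABELS = {
--     'true': (0, True), 'yes': (0, True), 'enable': (0, True),
--     'false': (0, False), 'no': (0, False), 'disable': (0, False),
--     'set': (1, True), 'high': (1, True),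
--     'clear': (1, False), 'low': (1, False),
--     'required': (2, True), 'must': (2, True),
--     'optional': (2, False), 'may': (2, False),
-- }
--
--
-- def _labels(s: str) -> set:
--     """Slide over the lowered string once; at each position collect the label
--     of every keyword that starts there."""
--     low = s.lower()
--     found = set()
--     for j in range(len(low) + 1):
--         for word, lab in _WORD_LABELS.items():
--             if low.startswith(word, j):
--                 found.add(lab)
--     return found
--
--
-- def _contains_contradiction(value1: str, value2: str) -> bool:
--     l1 = _labels(value1)
--     l2 = _labels(value2)
--     return any((i, not p) in l1 for (i, p) in l2)
-- ===== Notes on version B (the rewrite author's own statement) =====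
-- stated objective: alternative
-- what changed: B flattens the pair table into a single word->(pair,polarity) map and slides over each lowered string position-by-position collecting matched labels, then tests whether one string's label set contains the flip of any label of the other, instead of A's per-pair substring rescans of both strings with early return.
import Mathlib
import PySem

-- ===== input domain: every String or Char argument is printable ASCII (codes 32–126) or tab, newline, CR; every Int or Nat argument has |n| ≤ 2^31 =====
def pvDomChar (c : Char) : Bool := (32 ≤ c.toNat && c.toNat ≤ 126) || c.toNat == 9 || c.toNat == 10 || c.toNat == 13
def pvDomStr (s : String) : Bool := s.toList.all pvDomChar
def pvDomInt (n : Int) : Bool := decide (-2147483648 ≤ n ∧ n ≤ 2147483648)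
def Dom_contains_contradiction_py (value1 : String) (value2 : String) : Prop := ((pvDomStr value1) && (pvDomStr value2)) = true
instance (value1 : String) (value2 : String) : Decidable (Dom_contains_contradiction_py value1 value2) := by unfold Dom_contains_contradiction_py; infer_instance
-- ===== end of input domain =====

-- B is an alternative algorithm: one flat word->(pair,polarity) table, a single positional scan
-- of each lowered string collecting matched labels, then a flip-membership comparison of the two
-- label sets, instead of A's per-pair substring rescans with early return. Same result, similar cost.

-- ===== PORT A =====
-- 'any(word in s for word in words)'
def pvAnyIn (words : List String) (s : String) : Bool :=
  words.any (fun w => PySem.Str.isIn w s)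

-- the loop 'for positive, negative in bool_contradictions: … return True / fall through'
def pvLoopA : List (List String × List String) → String → String → Bool
  | [], _, _ => false
  | (positive, negative) :: rest, v1, v2 =>
    let has_pos_1 := pvAnyIn positive v1
    let has_neg_1 := pvAnyIn negative v1
    let has_pos_2 := pvAnyIn positive v2
    let has_neg_2 := pvAnyIn negative v2
    if (has_pos_1 && has_neg_2) || (has_neg_1 && has_pos_2) then true
    else pvLoopA rest v1 v2

def contains_contradiction_py (value1 : String) (value2 : String) : Bool :=
  let v1_lower := PySem.Str.lower value1
  let v2_lower := PySem.Str.lower value2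
  let bool_contradictions : List (List String × List String) :=
    [(["true", "yes", "enable"], ["false", "no", "disable"]),
     (["set", "high"], ["clear", "low"]),
     (["required", "must"], ["optional", "may"])]
  pvLoopA bool_contradictions v1_lower v2_lower

-- ===== PORT B =====
-- _WORD_LABELS, as an association list in insertion order (keys as char lists)
def pvWordTable : List (List Char × (Int × Bool)) :=
  [("true".toList, (0, true)), ("yes".toList, (0, true)), ("enable".toList, (0, true)),
   ("false".toList, (0, false)), ("no".toList, (0, false)), ("disable".toList, (0, false)),
   ("set".toList, (1, true)), ("high".toList, (1, true)),
   ("clear".toList, (1, false)), ("low".toList, (1, false)),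
   ("required".toList, (2, true)), ("must".toList, (2, true)),
   ("optional".toList, (2, false)), ("may".toList, (2, false))]

-- inner loop: 'for word, lab in _WORD_LABELS.items(): if low.startswith(word, j): found.add(lab)'
def pvScanPos (low : List Char) (found : PySem.Set (Int × Bool)) (j : Nat) : PySem.Set (Int × Bool) :=
  pvWordTable.foldl
    (fun acc wl => if wl.1.isPrefixOf (low.drop j) then PySem.Set.add acc wl.2 else acc) found

-- _labels(s): slide over positions 0..len(low)
def pvLabels (s : String) : PySem.Set (Int × Bool) :=
  let low := (PySem.Str.lower s).toList
  (List.range (low.length + 1)).foldl (pvScanPos low) PySem.Set.empty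

def contains_contradiction_py_alt (value1 : String) (value2 : String) : Bool :=
  let l1 := pvLabels value1
  let l2 := pvLabels value2
  l2.any (fun x => PySem.Set.contains l1 (x.1, !x.2))

-- ===== PRECONDITION & SPEC =====
def Spec_contains_contradiction_py (value1 : String) (value2 : String) (out : Bool) : Prop := out = contains_contradiction_py_alt value1 value2
instance (value1 : String) (value2 : String) (out : Bool) : Decidable (Spec_contains_contradiction_py value1 value2 out) := by unfold Spec_contains_contradiction_py; infer_instance

-- ===== CLAIM (what is proved, stated in full; the proofs are below) =====
def Claim_equal_contains_contradiction_py : Prop := ∀ (value1 : String) (value2 : String), Dom_contains_contradiction_py value1 value2 → Spec_contains_contradiction_py value1 value2 (contains_contradiction_py value1 value2)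

-- ===== LEMMAS AND PROOFS =====

-- membership through the inner table fold
theorem pv_mem_fold_add (low : List Char) (j : Nat)
    (tbl : List (List Char × (Int × Bool))) (acc : PySem.Set (Int × Bool)) (x : Int × Bool) :
    x ∈ tbl.foldl
        (fun acc wl => if wl.1.isPrefixOf (low.drop j) then PySem.Set.add acc wl.2 else acc) acc ↔
      x ∈ acc ∨ ∃ wl ∈ tbl, x = wl.2 ∧ wl.1.isPrefixOf (low.drop j) = true := by
  induction tbl generalizing acc with
  | nil => simp
  | cons hd tl ih =>
    simp only [List.foldl_cons, ih, List.mem_cons]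
    split_ifs <;> simp_all [PySem.Set.mem_add, or_assoc]

theorem pv_mem_scanPos (low : List Char) (acc : PySem.Set (Int × Bool)) (j : Nat)
    (x : Int × Bool) :
    x ∈ pvScanPos low acc j ↔
      x ∈ acc ∨ ∃ wl ∈ pvWordTable, x = wl.2 ∧ wl.1.isPrefixOf (low.drop j) = true := by
  exact pv_mem_fold_add low j pvWordTable acc x

-- membership through the outer positional fold, for any list of positions
theorem pv_mem_foldl_scan (low : List Char) (js : List Nat)
    (acc : PySem.Set (Int × Bool)) (x : Int × Bool) :
    x ∈ js.foldl (pvScanPos low) acc ↔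
      x ∈ acc ∨ ∃ j ∈ js, ∃ wl ∈ pvWordTable, x = wl.2 ∧ wl.1.isPrefixOf (low.drop j) = true := by
  induction js generalizing acc with
  | nil => simp
  | cons hd tl ih =>
    simp only [List.foldl_cons, ih, List.mem_cons]
    rw [pv_mem_scanPos]
    constructor
    · rintro ((h | h) | h)
      · exact Or.inl h
      · exact Or.inr ⟨hd, Or.inl rfl, h⟩
      · obtain ⟨j, hj, h⟩ := h; exact Or.inr ⟨j, Or.inr hj, h⟩
    · rintro (h | ⟨j, (rfl | hj), h⟩)
      · exact Or.inl (Or.inl h)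
      · exact Or.inl (Or.inr h)
      · exact Or.inr ⟨j, hj, h⟩

-- a word starts at some position scanned by B iff it is a substring
theorem pv_exists_pos (w low : List Char) :
    (∃ j ∈ List.range (low.length + 1), w.isPrefixOf (low.drop j) = true) ↔
      PySem.Chars.isIn w low = true := by
  constructor
  · rintro ⟨j, _, h⟩
    exact (PySem.Chars.exists_prefix_drop_iff_isIn _ _).mp ⟨j, (List.isPrefixOf_iff_prefix).mp h⟩
  · intro h
    obtain ⟨j, hp⟩ := (PySem.Chars.exists_prefix_drop_iff_isIn _ _).mpr h
    refine ⟨min j low.length, List.mem_range.mpr (by omega), ?_⟩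
    rw [List.isPrefixOf_iff_prefix]
    by_cases hle : j ≤ low.length
    · simpa [Nat.min_eq_left hle] using hp
    · have hlt : low.length < j := by omega
      have h1 : low.drop j = [] := List.drop_eq_nil_of_le (by omega)
      have h2 : low.drop (min j low.length) = [] := List.drop_eq_nil_of_le (by omega)
      rw [h2]; rw [h1] at hp; exact hp

-- the positional scan finds exactly the substring matches
theorem pv_mem_labels (s : String) (x : Int × Bool) :
    x ∈ pvLabels s ↔
      ∃ wl ∈ pvWordTable, x = wl.2 ∧ PySem.Chars.isIn wl.1 (PySem.Str.lower s).toList = true := by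
  simp only [pvLabels]
  rw [pv_mem_foldl_scan]
  simp only [PySem.Set.empty, List.not_mem_nil, false_or]
  constructor
  · rintro ⟨j, hj, wl, hwl, hx, hp⟩
    exact ⟨wl, hwl, hx, (pv_exists_pos wl.1 _).mp ⟨j, hj, hp⟩⟩
  · rintro ⟨wl, hwl, hx, hin⟩
    obtain ⟨j, hj, hp⟩ := (pv_exists_pos wl.1 _).mpr hin
    exact ⟨j, hj, wl, hwl, hx, hp⟩

-- Chars-level 'any word a substring'
def pvAnyInC (words : List (List Char)) (low : List Char) : Bool :=
  words.any (fun w => PySem.Chars.isIn w low)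

def pvWT : List (List Char) := ["true".toList, "yes".toList, "enable".toList]
def pvWF : List (List Char) := ["false".toList, "no".toList, "disable".toList]
def pvWS : List (List Char) := ["set".toList, "high".toList]
def pvWC : List (List Char) := ["clear".toList, "low".toList]
def pvWR : List (List Char) := ["required".toList, "must".toList]
def pvWO : List (List Char) := ["optional".toList, "may".toList]

set_option maxHeartbeats 1000000 in
theorem pv_contains_labels (s : String) (i : Int) (b : Bool) :
    PySem.Set.contains (pvLabels s) (i, b) =
      (((i == 0) && (if b then pvAnyInC pvWT (PySem.Chars.lower s.toList)
                          else pvAnyInC pvWF (PySem.Chars.lower s.toList)))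
       || ((i == 1) && (if b then pvAnyInC pvWS (PySem.Chars.lower s.toList)
                             else pvAnyInC pvWC (PySem.Chars.lower s.toList)))
       || ((i == 2) && (if b then pvAnyInC pvWR (PySem.Chars.lower s.toList)
                             else pvAnyInC pvWO (PySem.Chars.lower s.toList)))) := by
  rw [Bool.eq_iff_iff, PySem.Set.contains_iff, pv_mem_labels]
  simp only [pvWordTable, List.mem_cons, List.not_mem_nil]
  cases b <;>
    simp [pvAnyInC, pvWT, pvWF, pvWS, pvWC, pvWR, pvWO, Prod.mk.injEq, and_or_left, or_assoc]

-- the common flat boolean / proposition both programs decide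
def pvPB (v1 v2 : String) : Bool :=
  (pvAnyInC pvWT (PySem.Chars.lower v1.toList) && pvAnyInC pvWF (PySem.Chars.lower v2.toList)
    || pvAnyInC pvWF (PySem.Chars.lower v1.toList) && pvAnyInC pvWT (PySem.Chars.lower v2.toList))
  || ((pvAnyInC pvWS (PySem.Chars.lower v1.toList) && pvAnyInC pvWC (PySem.Chars.lower v2.toList)
    || pvAnyInC pvWC (PySem.Chars.lower v1.toList) && pvAnyInC pvWS (PySem.Chars.lower v2.toList))
  || ((pvAnyInC pvWR (PySem.Chars.lower v1.toList) && pvAnyInC pvWO (PySem.Chars.lower v2.toList)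
    || pvAnyInC pvWO (PySem.Chars.lower v1.toList) && pvAnyInC pvWR (PySem.Chars.lower v2.toList))
  || false))

def pvP (v1 v2 : String) : Prop :=
  (pvAnyInC pvWT (PySem.Chars.lower v1.toList) = true ∧ pvAnyInC pvWF (PySem.Chars.lower v2.toList) = true) ∨
  (pvAnyInC pvWF (PySem.Chars.lower v1.toList) = true ∧ pvAnyInC pvWT (PySem.Chars.lower v2.toList) = true) ∨
  (pvAnyInC pvWS (PySem.Chars.lower v1.toList) = true ∧ pvAnyInC pvWC (PySem.Chars.lower v2.toList) = true) ∨
  (pvAnyInC pvWC (PySem.Chars.lower v1.toList) = true ∧ pvAnyInC pvWS (PySem.Chars.lower v2.toList) = true) ∨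
  (pvAnyInC pvWR (PySem.Chars.lower v1.toList) = true ∧ pvAnyInC pvWO (PySem.Chars.lower v2.toList) = true) ∨
  (pvAnyInC pvWO (PySem.Chars.lower v1.toList) = true ∧ pvAnyInC pvWR (PySem.Chars.lower v2.toList) = true)

theorem pv_if_or (c r : Bool) : (if c then true else r) = (c || r) := by
  cases c <;> simp

theorem pv_A_eq (v1 v2 : String) : contains_contradiction_py v1 v2 = pvPB v1 v2 := by
  simp only [contains_contradiction_py, pvLoopA, pv_if_or, pvPB, pvAnyIn, pvAnyInC,
    pvWT, pvWF, pvWS, pvWC, pvWR, pvWO, List.any_cons, List.any_nil,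
    PySem.Str.isIn_eq, PySem.Str.toList_lower]

theorem pv_PB_iff (v1 v2 : String) : pvPB v1 v2 = true ↔ pvP v1 v2 := by
  simp [pvPB, pvP, or_assoc]

theorem pv_A_iff (v1 v2 : String) : contains_contradiction_py v1 v2 = true ↔ pvP v1 v2 := by
  rw [pv_A_eq, pv_PB_iff]

set_option maxHeartbeats 1000000 in
theorem pv_B_iff (v1 v2 : String) : contains_contradiction_py_alt v1 v2 = true ↔ pvP v1 v2 := by
  show (pvLabels v2).any _ = true ↔ _
  rw [List.any_eq_true]
  constructor
  · rintro ⟨x, hx2, hx1⟩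
    rw [← PySem.Set.contains_iff, pv_contains_labels] at hx2
    rw [pv_contains_labels] at hx1
    obtain ⟨i, b⟩ := x
    unfold pvP
    cases b
    · simp at hx2 hx1
      rcases hx2 with (⟨rfl, h2⟩ | ⟨rfl, h2⟩) | ⟨rfl, h2⟩ <;>
        rcases hx1 with (⟨h0, h1⟩ | ⟨h0, h1⟩) | ⟨h0, h1⟩ <;>
        first
          | omega
          | exact Or.inl ⟨h1, h2⟩
          | exact Or.inr (Or.inr (Or.inl ⟨h1, h2⟩))
          | exact Or.inr (Or.inr (Or.inr (Or.inr (Or.inl ⟨h1, h2⟩))))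
    · simp at hx2 hx1
      rcases hx2 with (⟨rfl, h2⟩ | ⟨rfl, h2⟩) | ⟨rfl, h2⟩ <;>
        rcases hx1 with (⟨h0, h1⟩ | ⟨h0, h1⟩) | ⟨h0, h1⟩ <;>
        first
          | omega
          | exact Or.inr (Or.inl ⟨h1, h2⟩)
          | exact Or.inr (Or.inr (Or.inr (Or.inl ⟨h1, h2⟩)))
          | exact Or.inr (Or.inr (Or.inr (Or.inr (Or.inr ⟨h1, h2⟩))))
  · intro h
    unfold pvP at h
    rcases h with ⟨h1, h2⟩ | ⟨h1, h2⟩ | ⟨h1, h2⟩ | ⟨h1, h2⟩ | ⟨h1, h2⟩ | ⟨h1, h2⟩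
    · exact ⟨((0 : Int), false), by rw [← PySem.Set.contains_iff, pv_contains_labels]; simp [h2],
        by rw [pv_contains_labels]; simp [h1]⟩
    · exact ⟨((0 : Int), true), by rw [← PySem.Set.contains_iff, pv_contains_labels]; simp [h2],
        by rw [pv_contains_labels]; simp [h1]⟩
    · exact ⟨((1 : Int), false), by rw [← PySem.Set.contains_iff, pv_contains_labels]; simp [h2],
        by rw [pv_contains_labels]; simp [h1]⟩
    · exact ⟨((1 : Int), true), by rw [← PySem.Set.contains_iff, pv_contains_labels]; simp [h2],
        by rw [pv_contains_labels]; simp [h1]⟩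
    · exact ⟨((2 : Int), false), by rw [← PySem.Set.contains_iff, pv_contains_labels]; simp [h2],
        by rw [pv_contains_labels]; simp [h1]⟩
    · exact ⟨((2 : Int), true), by rw [← PySem.Set.contains_iff, pv_contains_labels]; simp [h2],
        by rw [pv_contains_labels]; simp [h1]⟩

-- ===== VERDICT (by name: the statement is the Claim_ definition above) =====
theorem contains_contradiction_py_spec : Claim_equal_contains_contradiction_py := by
  intro v1 v2 _
  show _ = _
  rw [Bool.eq_iff_iff, pv_A_iff, pv_B_iff]
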